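-- pv_equiv track=rewrite | github.com/serrasqueiro/codeclone | steerblur/anacondy_com/scripts/reindent.test.py | headed_blanks
-- ===== SOURCE A (Python) =====
-- def headed_blanks (s, instead='.'):
--     spl = s.split("\n")
--     res = ""
--     for x in spl:
--         s = ""
--         head = 0
--         for c in x:
--             d = c
--             if head>=0:
--                 if c==" ":
--                     head += 1
--                     d = instead
--                 else:
--                     head = -1
--             s += d
--         res += s + "\n"
--     return res
-- ===== SOURCE B (Python) =====
-- def headed_blanks(s, instead='.'):
--     pieces = []
--     for x in s.split("\n"):
--         n = len(x) - len(x.lstrip(' '))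
--         pieces.append(instead * n + x[n:] + "\n")
--     return "".join(pieces)
-- ===== Notes on version B (the rewrite author's own statement) =====
-- stated objective: simpler
-- what changed: Replaces the per-character state machine (head flag, char-by-char string accumulation) by computing each line's leading-space count via lstrip and building the line as instead*n + x[n:] joined at the end.
import Mathlib
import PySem

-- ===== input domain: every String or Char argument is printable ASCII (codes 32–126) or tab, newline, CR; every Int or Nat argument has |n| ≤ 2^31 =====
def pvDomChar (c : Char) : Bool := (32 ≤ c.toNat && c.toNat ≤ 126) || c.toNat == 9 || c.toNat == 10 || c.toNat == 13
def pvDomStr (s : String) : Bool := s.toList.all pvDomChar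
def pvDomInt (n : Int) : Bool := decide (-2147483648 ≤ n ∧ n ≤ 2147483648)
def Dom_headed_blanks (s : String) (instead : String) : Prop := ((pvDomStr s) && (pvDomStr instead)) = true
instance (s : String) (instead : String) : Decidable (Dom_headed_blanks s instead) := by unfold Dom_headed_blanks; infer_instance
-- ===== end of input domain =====

-- B replaces A's per-character head-flag state machine by counting the leading spaces of
-- each line and building instead*n + rest; objective: simpler.

-- ===== PORT A =====
-- inner 'for c in x' loop of A, state = (head, accumulated line s)
def hbLoopA (instead : List Char) : List Char → Int → List Char → List Char
  | [], _, acc => acc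
  | c :: cs, head, acc =>
    if head ≥ 0 then
      if c = ' ' then hbLoopA instead cs (head + 1) (acc ++ instead)
      else hbLoopA instead cs (-1) (acc ++ [c])
    else hbLoopA instead cs head (acc ++ [c])

def headed_blanks (s : String) (instead : String) : String :=
  String.mk ((PySem.Chars.splitOn s.toList ['\n']).foldl
    (fun res x => res ++ hbLoopA instead.toList x 0 [] ++ ['\n']) [])

-- ===== PORT B =====
-- one line of B: n = len(x) - len(x.lstrip(' ')) (lstrip(' ') is exactly dropWhile (= ' ')),
-- then instead*n + x[n:] + "\n" (x[n:] with 0 ≤ n ≤ len x is drop n)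
def hbLineB (instead : List Char) (x : List Char) : List Char :=
  let n := x.length - (x.dropWhile (fun c => c == ' ')).length
  PySem.List.pyRepeat instead (n : Int) ++ x.drop n ++ ['\n']

def headed_blanks_alt (s : String) (instead : String) : String :=
  String.mk (((PySem.Chars.splitOn s.toList ['\n']).map (hbLineB instead.toList)).flatten)

-- ===== PRECONDITION & SPEC =====
def Spec_headed_blanks (s : String) (instead : String) (out : String) : Prop := out = headed_blanks_alt s instead
instance (s : String) (instead : String) (out : String) : Decidable (Spec_headed_blanks s instead out) := by unfold Spec_headed_blanks; infer_instance

-- ===== CLAIM (what is proved, stated in full; the proofs are below) =====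
def Claim_equal_headed_blanks : Prop := ∀ (s : String) (instead : String), Dom_headed_blanks s instead → Spec_headed_blanks s instead (headed_blanks s instead)

-- ===== LEMMAS AND PROOFS =====

theorem hbLoopA_neg (i : List Char) (cs : List Char) :
    ∀ (h : Int) (acc : List Char), h < 0 → hbLoopA i cs h acc = acc ++ cs := by
  induction cs with
  | nil => intro h acc _; simp [hbLoopA]
  | cons c cs ih =>
    intro h acc hneg
    simp only [hbLoopA, if_neg (by omega : ¬ h ≥ 0)]
    rw [ih h _ hneg]; simp

theorem hbLoopA_nonneg (i : List Char) (cs : List Char) :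
    ∀ (h : Int) (acc : List Char), 0 ≤ h →
      hbLoopA i cs h acc =
        acc ++ PySem.List.pyRepeat i ((cs.takeWhile (fun c => c == ' ')).length : Int)
            ++ cs.drop (cs.takeWhile (fun c => c == ' ')).length := by
  induction cs with
  | nil => intro h acc _; simp [hbLoopA, PySem.List.pyRepeat]
  | cons c cs ih =>
    intro h acc hpos
    by_cases hc : c = ' '
    · subst hc
      simp only [hbLoopA, if_pos hpos]
      rw [ih (h + 1) _ (by omega)]
      simp only [List.takeWhile_cons, beq_self_eq_true, if_pos]
      have : PySem.List.pyRepeat i (((cs.takeWhile (fun c => c == ' ')).length + 1 : Nat) : Int)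
          = i ++ PySem.List.pyRepeat i ((cs.takeWhile (fun c => c == ' ')).length : Int) := by
        simp [PySem.List.pyRepeat, List.replicate_succ]
      simp only [List.length_cons, this, List.drop_succ_cons]
      simp
    · simp only [hbLoopA, if_pos hpos, if_neg hc]
      rw [hbLoopA_neg i cs _ _ (by omega)]
      have hb : (c == ' ') = false := by simpa using hc
      simp [hb, PySem.List.pyRepeat]

theorem takeWhile_length_eq (x : List Char) :
    x.length - (x.dropWhile (fun c => c == ' ')).length
      = (x.takeWhile (fun c => c == ' ')).length := by
  have h := congrArg List.length (List.takeWhile_append_dropWhile (p := fun c => c == ' ') (l := x))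
  rw [List.length_append] at h
  omega

theorem drop_takeWhile_length (x : List Char) :
    x.drop (x.takeWhile (fun c => c == ' ')).length = x.dropWhile (fun c => c == ' ') := by
  nth_rewrite 2 [← List.takeWhile_append_dropWhile (p := fun c => c == ' ') (l := x)]
  rw [List.drop_left]

theorem line_eq (i x : List Char) :
    hbLoopA i x 0 [] ++ ['\n'] = hbLineB i x := by
  rw [hbLoopA_nonneg i x 0 [] le_rfl]
  unfold hbLineB
  rw [takeWhile_length_eq, drop_takeWhile_length, ← drop_takeWhile_length]
  simp

theorem foldl_eq_flatten (i : List Char) (ls : List (List Char)) :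
    ∀ acc : List Char,
      ls.foldl (fun res x => res ++ hbLoopA i x 0 [] ++ ['\n']) acc
        = acc ++ (ls.map (hbLineB i)).flatten := by
  induction ls with
  | nil => intro acc; simp
  | cons x ls ih =>
    intro acc
    simp only [List.foldl_cons, List.map_cons, List.flatten_cons]
    rw [ih, List.append_assoc, ← line_eq]
    simp

-- ===== VERDICT (by name: the statement is the Claim_ definition above) =====
theorem headed_blanks_spec : Claim_equal_headed_blanks := by
  intro s instead _
  unfold Spec_headed_blanks headed_blanks headed_blanks_alt
  rw [foldl_eq_flatten]
  simp
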